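-- pv_equiv track=rewrite | github.com/JayZejianZhou/shauti | amazon/LC1487.py | getFolderNames
-- ===== SOURCE A (Python) =====
-- def getFolderNames(names):
--     """
--     :type names: List[str]
--     :rtype: List[str]
--     """
--     data = {}
--     res = []
--
--     for name in names:
--         count = data.get(name, 0)
--         if count == 0:
--             data[name] = 1
--             res.append(name)
--         else:
--             name_back = name
--             while name_back in data:
--                 name_back = name + '(' + str(count) + ')'
--                 count += 1
--             data[name] = count
--             data[name_back] = 1
--             res.append(name_back)
--
--     return res
-- ===== SOURCE B (Python) =====
-- def getFolderNames(names):
--     used = set()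
--     res = []
--     for name in names:
--         if name not in used:
--             res.append(name)
--             used.add(name)
--         else:
--             k = 1
--             while name + '(' + str(k) + ')' in used:
--                 k += 1
--             cand = name + '(' + str(k) + ')'
--             res.append(cand)
--             used.add(cand)
--     return res
-- ===== Notes on version B (the rewrite author's own statement) =====
-- stated objective: simpler
-- what changed: B keeps only a single set of assigned names and, for each duplicate, searches for the smallest free suffix starting from k=1 each time, instead of A's dict that caches a per-name resume counter alongside the assigned names.
import Mathlib
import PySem

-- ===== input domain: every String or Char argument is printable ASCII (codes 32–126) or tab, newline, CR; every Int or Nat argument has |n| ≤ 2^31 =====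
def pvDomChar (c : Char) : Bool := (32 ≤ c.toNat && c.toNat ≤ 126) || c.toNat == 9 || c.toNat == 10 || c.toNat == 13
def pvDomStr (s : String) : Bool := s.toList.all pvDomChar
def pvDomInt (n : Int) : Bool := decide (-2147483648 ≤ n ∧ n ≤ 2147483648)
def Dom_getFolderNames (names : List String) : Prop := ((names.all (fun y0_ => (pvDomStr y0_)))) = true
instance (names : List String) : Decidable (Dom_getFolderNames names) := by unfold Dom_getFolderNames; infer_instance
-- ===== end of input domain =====

-- B keeps only a single set of assigned names and restarts the suffix search at 1 for each
-- duplicate, instead of A's dict caching a per-name resume counter; return values are equal.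

-- name + '(' + str(k) + ')'  (shared by both Pythons verbatim)
def pvCand (name : String) (k : Int) : String := name ++ "(" ++ PySem.Int.toStr k ++ ")"

-- ===== PORT A =====
-- the 'while name_back in data' loop; fuel data.size + 2 always suffices (proved below)
def pvLoopA (data : PySem.Dict String Int) (name : String) : Nat → String → Int → String × Int
  | 0, nb, count => (nb, count)
  | f+1, nb, count =>
      if data.contains nb then pvLoopA data name f (pvCand name count) (count + 1)
      else (nb, count)

def pvStepA (st : PySem.Dict String Int × List String) (name : String) :
    PySem.Dict String Int × List String :=
  let data := st.1
  let res := st.2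
  let count := data.getD name 0
  if count = 0 then (data.insert name 1, res ++ [name])
  else
    let p := pvLoopA data name (data.size + 2) name count
    ((data.insert name p.2).insert p.1 1, res ++ [p.1])

def getFolderNames (names : List String) : List String :=
  (names.foldl pvStepA (PySem.Dict.empty, [])).2

-- ===== PORT B =====
-- the 'while name + '(' + str(k) + ')' in used' loop; fuel used.len + 1 always suffices
def pvLoopB (used : PySem.Set String) (name : String) : Nat → Int → Int
  | 0, k => k
  | f+1, k => if PySem.Set.contains used (pvCand name k) then pvLoopB used name f (k+1) else k

def pvStepB (st : PySem.Set String × List String) (name : String) :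
    PySem.Set String × List String :=
  let used := st.1
  let res := st.2
  if !(PySem.Set.contains used name) then (PySem.Set.add used name, res ++ [name])
  else
    let k := pvLoopB used name (used.length + 1) 1
    (PySem.Set.add used (pvCand name k), res ++ [pvCand name k])

def getFolderNames_alt (names : List String) : List String :=
  (names.foldl pvStepB (PySem.Set.empty, [])).2

-- ===== PRECONDITION & SPEC =====
def Spec_getFolderNames (names : List String) (out : List String) : Prop := out = getFolderNames_alt names
instance (names : List String) (out : List String) : Decidable (Spec_getFolderNames names out) := by unfold Spec_getFolderNames; infer_instance

-- ===== CLAIM (what is proved, stated in full; the proofs are below) =====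
def Claim_equal_getFolderNames : Prop := ∀ (names : List String), Dom_getFolderNames names → Spec_getFolderNames names (getFolderNames names)

-- ===== LEMMAS AND PROOFS =====

-- str(n) is injective on positive n
theorem pvToDigits_ne_nil (n : Nat) : Nat.toDigits 10 n ≠ [] := by
  rw [Nat.toDigits_eq_if (by norm_num)]
  split <;> simp

theorem pvToDigits_inj : ∀ m n : Nat, Nat.toDigits 10 m = Nat.toDigits 10 n → m = n := by
  intro m
  induction m using Nat.strong_induction_on with
  | _ m ih =>
    intro n h
    have hd : ∀ d < 10, ∀ e < 10, Nat.digitChar d = Nat.digitChar e → d = e := by decide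
    rw [Nat.toDigits_eq_if (b := 10) (n := m) (by norm_num),
        Nat.toDigits_eq_if (b := 10) (n := n) (by norm_num)] at h
    by_cases hm : m < 10 <;> by_cases hn : n < 10
    · rw [if_pos hm, if_pos hn] at h
      simp only [List.cons.injEq] at h
      exact hd _ hm _ hn h.1
    · rw [if_pos hm, if_neg hn] at h
      exfalso
      cases hnil : Nat.toDigits 10 (n / 10) with
      | nil => exact pvToDigits_ne_nil _ hnil
      | cons a l =>
        rw [hnil] at h
        have := congrArg List.length h
        simp at this
    · rw [if_neg hm, if_pos hn] at h
      exfalso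
      cases hnil : Nat.toDigits 10 (m / 10) with
      | nil => exact pvToDigits_ne_nil _ hnil
      | cons a l =>
        rw [hnil] at h
        have := congrArg List.length h
        simp at this
    · rw [if_neg hm, if_neg hn] at h
      have h2 := List.append_inj' h (by simp)
      simp only [List.cons.injEq] at h2
      have hmod : m % 10 = n % 10 :=
        hd _ (Nat.mod_lt _ (by norm_num)) _ (Nat.mod_lt _ (by norm_num)) h2.2.1
      have hdiv : m / 10 = n / 10 := ih (m / 10) (Nat.div_lt_self (by omega) (by norm_num)) _ h2.1
      omega

theorem pvToStr_inj {m n : Int} (hm : 1 ≤ m) (hn : 1 ≤ n)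
    (h : PySem.Int.toStr m = PySem.Int.toStr n) : m = n := by
  have h' : PySem.Int.toChars m = PySem.Int.toChars n := by
    rw [← PySem.Int.toList_toStr, ← PySem.Int.toList_toStr, h]
  simp only [PySem.Int.toChars] at h'
  rw [if_neg (by omega), if_neg (by omega)] at h'
  have := pvToDigits_inj _ _ h'
  omega

theorem pvCand_inj {s : String} {m n : Int} (hm : 1 ≤ m) (hn : 1 ≤ n)
    (h : pvCand s m = pvCand s n) : m = n := by
  apply pvToStr_inj hm hn
  have h1 := congrArg String.toList h
  simp only [pvCand, String.toList_append, List.append_assoc] at h1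
  have h2 := List.append_cancel_right (List.append_cancel_left (List.append_cancel_left h1))
  exact String.toList_inj.mp h2

theorem pvCand_ne (s : String) (k : Int) : pvCand s k ≠ s := by
  intro h
  have h1 := congrArg (fun t => t.toList.length) h
  simp only [pvCand, String.toList_append, List.length_append] at h1
  have e1 : ("(".toList).length = 1 := rfl
  have e2 : (")".toList).length = 1 := rfl
  omega

-- membership in a list of strings: pigeonhole — some suffix in 1..len+1 is free
theorem pvExistsFree (keys : List String) (name : String) :
    ∃ d : Nat, d ≤ keys.length ∧ pvCand name (1 + d) ∉ keys := by
  by_contra hc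
  push_neg at hc
  have hall : ∀ d : Fin (keys.length + 1), pvCand name (1 + (d : Nat)) ∈ keys := by
    intro d; exact hc d (Nat.lt_succ_iff.mp d.isLt)
  have hinj : Function.Injective (fun d : Fin (keys.length + 1) => pvCand name (1 + (d : Nat))) := by
    intro d e h
    have := pvCand_inj (by omega) (by omega) h
    have : (d : Nat) = (e : Nat) := by omega
    exact Fin.ext this
  have hsub : (Finset.univ.image (fun d : Fin (keys.length + 1) => pvCand name (1 + (d : Nat)))) ⊆ keys.toFinset := by
    intro x hx
    simp only [Finset.mem_image] at hx
    obtain ⟨d, _, rfl⟩ := hx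
    exact List.mem_toFinset.mpr (hall d)
  have h1 := Finset.card_le_card hsub
  rw [Finset.card_image_of_injective _ hinj] at h1
  have h2 := keys.toFinset_card_le
  simp at h1
  omega

-- loop characterizations
theorem pvLoopA_run (data : PySem.Dict String Int) (name : String) (k : Int)
    (hkfree : data.contains (pvCand name k) = false) :
    ∀ (f : Nat) (c : Int) (nb : String), data.contains nb = true → c ≤ k → k - c < (f : Int) →
    (∀ j : Int, c ≤ j → j < k → data.contains (pvCand name j) = true) →
    pvLoopA data name f nb c = (pvCand name k, k + 1) := by
  intro f
  induction f with
  | zero => intro c nb _ h1 h2 _; exfalso; simp at h2; omega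
  | succ f ih =>
    intro c nb hnb h1 h2 hmem
    simp only [pvLoopA, hnb, if_true]
    by_cases hck : c = k
    · subst hck
      cases f with
      | zero => simp [pvLoopA]
      | succ f => simp [pvLoopA, hkfree]
    · exact ih (c+1) _ (hmem c le_rfl (by omega)) (by omega) (by omega)
        (fun j hj1 hj2 => hmem j (by omega) hj2)

theorem pvLoopB_run (used : PySem.Set String) (name : String) (k : Int)
    (hkfree : PySem.Set.contains used (pvCand name k) = false) :
    ∀ (f : Nat) (c : Int), c ≤ k → k - c < (f : Int) →
    (∀ j : Int, c ≤ j → j < k → PySem.Set.contains used (pvCand name j) = true) →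
    pvLoopB used name f c = k := by
  intro f
  induction f with
  | zero => intro c h1 h2 _; exfalso; simp at h2; omega
  | succ f ih =>
    intro c h1 h2 hmem
    by_cases hck : c = k
    · subst hck
      simp only [pvLoopB, hkfree, Bool.false_eq_true, if_false]
    · simp only [pvLoopB, hmem c le_rfl (by omega), if_true]
      exact ih (c+1) (by omega) (by omega) (fun j hj1 hj2 => hmem j (by omega) hj2)

-- the invariant: B's set is exactly A's key list, and cached counters are sound
def pvInv (data : PySem.Dict String Int) (used : PySem.Set String) : Prop :=
  used = data.keys ∧
  ∀ s c, data.get? s = some c → 1 ≤ c ∧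
    ∀ j : Int, 1 ≤ j → j < c → data.contains (pvCand s j) = true

theorem pvMain : ∀ (names : List String) (data : PySem.Dict String Int)
    (used : PySem.Set String) (res : List String), pvInv data used →
    (names.foldl pvStepA (data, res)).2 = (names.foldl pvStepB (used, res)).2 := by
  intro names
  induction names with
  | nil => intro data used res _; rfl
  | cons name rest ih =>
    intro data used res hinv
    obtain ⟨hkeys, hcnt⟩ := hinv
    have hmemEq : ∀ x, PySem.Set.contains used x = data.contains x := by
      intro x
      cases hx : data.contains x with
      | true =>
        exact (PySem.Set.contains_iff used x).mpr
          (hkeys ▸ (PySem.Dict.contains_iff_mem_keys data x).mp hx)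
      | false =>
        cases hy : PySem.Set.contains used x with
        | false => rfl
        | true =>
          exfalso
          have := (PySem.Dict.contains_iff_mem_keys data x).mpr
            (hkeys ▸ (PySem.Set.contains_iff used x).mp hy)
          rw [hx] at this; exact Bool.false_ne_true this
    have hsize : data.size = data.keys.length := by simp [PySem.Dict.size, PySem.Dict.keys]
    have hulen : used.length = data.keys.length := by rw [hkeys]
    simp only [List.foldl_cons]
    by_cases hc : data.contains name = true
    · -- duplicate: A resumes from the cached counter, B searches from 1
      have hsome : ∃ c0, data.get? name = some c0 := by
        rw [PySem.Dict.contains_eq_isSome_get?] at hc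
        exact Option.isSome_iff_exists.mp hc
      obtain ⟨c0, hc0⟩ := hsome
      obtain ⟨hc01, hbelow⟩ := hcnt name c0 hc0
      -- the smallest free suffix k ≥ 1
      have hP : ∃ e : Nat, data.contains (pvCand name (1 + (e : Int))) = false := by
        obtain ⟨d, hdL, hdfree⟩ := pvExistsFree data.keys name
        exact ⟨d, by
          cases hb : data.contains (pvCand name (1 + (d : Int))) with
          | false => rfl
          | true => exact absurd ((PySem.Dict.contains_iff_mem_keys _ _).mp hb) hdfree⟩
      set e0 := Nat.find hP with he0
      set k : Int := 1 + (e0 : Int) with hk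
      have hkfree : data.contains (pvCand name k) = false := Nat.find_spec hP
      have hmin : ∀ j : Int, 1 ≤ j → j < k → data.contains (pvCand name j) = true := by
        intro j hj1 hj2
        have hjn : j = 1 + ((j - 1).toNat : Int) := by omega
        have hlt : (j - 1).toNat < e0 := by omega
        have := Nat.find_min hP hlt
        rw [← hjn] at this
        cases hb : data.contains (pvCand name j) with
        | true => rfl
        | false => exact absurd hb this
      have hkc0 : c0 ≤ k := by
        by_contra hlt
        push_neg at hlt
        have := hbelow k (by omega) hlt
        rw [hkfree] at this; exact Bool.false_ne_true this
      have he0L : e0 ≤ data.keys.length := by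
        obtain ⟨d, hdL, hdfree⟩ := pvExistsFree data.keys name
        refine le_trans (Nat.find_min' hP ?_) hdL
        cases hb : data.contains (pvCand name (1 + (d : Int))) with
        | false => rfl
        | true => exact absurd ((PySem.Dict.contains_iff_mem_keys _ _).mp hb) hdfree
      have hgD : data.getD name 0 = c0 := by
        rw [PySem.Dict.getD_eq_get?_getD, hc0]; rfl
      have hA : pvStepA (data, res) name =
          ((data.insert name (k + 1)).insert (pvCand name k) 1, res ++ [pvCand name k]) := by
        have hrun := pvLoopA_run data name k hkfree (data.size + 2) c0 name hc hkc0
          (by rw [hsize]; push_cast; omega)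
          (fun j hj1 hj2 => hmin j (by omega) hj2)
        simp only [pvStepA, hgD, if_neg (by omega : ¬ c0 = (0 : Int)), hrun]
      have hused : PySem.Set.contains used name = true := by rw [hmemEq, hc]
      have husedfree : PySem.Set.contains used (pvCand name k) = false := by
        rw [hmemEq, hkfree]
      have hB : pvStepB (used, res) name =
          (PySem.Set.add used (pvCand name k), res ++ [pvCand name k]) := by
        have hrun := pvLoopB_run used name k husedfree (used.length + 1) 1 (by omega)
          (by rw [hulen]; push_cast; omega)
          (fun j hj1 hj2 => by rw [hmemEq]; exact hmin j hj1 hj2)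
        simp only [pvStepB, hused, Bool.not_true, Bool.false_eq_true, if_false, hrun]
      rw [hA, hB]
      apply ih
      constructor
      · -- keys tracking
        have h1 : (data.insert name (k + 1)).keys = data.keys :=
          PySem.Dict.keys_insert_of_contains data _ hc
        have h2 : ((data.insert name (k + 1)).insert (pvCand name k) 1).keys =
            data.keys ++ [pvCand name k] := by
          rw [PySem.Dict.keys_insert_of_not_contains, h1]
          rw [PySem.Dict.contains_insert]
          simp only [Bool.or_eq_false_iff]
          exact ⟨by simp [pvCand_ne name k], hkfree⟩
        rw [h2, ← hkeys]
        have : pvCand name k ∉ used := fun hm => by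
          rw [(PySem.Set.contains_iff used _).mpr hm] at husedfree
          exact absurd husedfree (by simp)
        simp [PySem.Set.add, this]
      · -- counter soundness
        intro s c hs
        rw [PySem.Dict.get?_insert] at hs
        have hcontains' : ∀ x, data.contains x = true →
            ((data.insert name (k + 1)).insert (pvCand name k) 1).contains x = true := by
          intro x hx
          rw [PySem.Dict.contains_insert, PySem.Dict.contains_insert, hx]
          simp
        split at hs
        · -- s = cand k, value 1
          cases hs
          exact ⟨le_rfl, fun j hj1 hj2 => absurd hj2 (by omega)⟩
        · rw [PySem.Dict.get?_insert] at hs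
          split at hs
          · -- s = name, value k + 1
            rename_i hne hse
            cases hs
            subst hse
            refine ⟨by omega, fun j hj1 hj2 => ?_⟩
            by_cases hjk : j = k
            · subst hjk
              rw [PySem.Dict.contains_insert]
              simp
            · exact hcontains' _ (hmin j hj1 (by omega))
          · obtain ⟨h1c, h2c⟩ := hcnt s c hs
            exact ⟨h1c, fun j hj1 hj2 => hcontains' _ (h2c j hj1 hj2)⟩
    · -- fresh name: both sides append it
      have hcf : data.contains name = false := by
        cases hx : data.contains name with
        | false => rfl
        | true => exact absurd hx hc
      have hnone : data.get? name = none := by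
        rw [PySem.Dict.contains_eq_isSome_get?] at hcf
        exact Option.not_isSome_iff_eq_none.mp (by rw [hcf]; simp)
      have hgD : data.getD name 0 = 0 := by
        rw [PySem.Dict.getD_eq_get?_getD, hnone]; rfl
      have hA : pvStepA (data, res) name = (data.insert name 1, res ++ [name]) := by
        simp [pvStepA, hgD]
      have husedf : PySem.Set.contains used name = false := by rw [hmemEq, hcf]
      have hB : pvStepB (used, res) name = (PySem.Set.add used name, res ++ [name]) := by
        simp only [pvStepB, husedf]
        rfl
      rw [hA, hB]
      apply ih
      constructor
      · rw [PySem.Dict.keys_insert_of_not_contains data _ hcf, ← hkeys]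
        have : name ∉ used := fun hm => by
          rw [(PySem.Set.contains_iff used _).mpr hm] at husedf
          exact absurd husedf (by simp)
        simp [PySem.Set.add, this]
      · intro s c hs
        rw [PySem.Dict.get?_insert] at hs
        split at hs
        · cases hs
          exact ⟨le_rfl, fun j hj1 hj2 => absurd hj2 (by omega)⟩
        · obtain ⟨h1c, h2c⟩ := hcnt s c hs
          refine ⟨h1c, fun j hj1 hj2 => ?_⟩
          rw [PySem.Dict.contains_insert, h2c j hj1 hj2]
          simp

theorem getFolderNames_spec' : ∀ names, getFolderNames names = getFolderNames_alt names := by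
  intro names
  unfold getFolderNames getFolderNames_alt
  apply pvMain
  constructor
  · rfl
  · intro s c h
    simp [PySem.Dict.get?_empty] at h

-- ===== VERDICT (by name: the statement is the Claim_ definition above) =====
theorem getFolderNames_spec : Claim_equal_getFolderNames := by
  intro names _
  unfold Spec_getFolderNames
  exact getFolderNames_spec' names
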